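-- pv_equiv track=rewrite | github.com/memory-eight-way/memory | quiz/make-quiz.py | proc_line_mask_short_word
-- ===== SOURCE A (Python) =====
-- MASK_CHAR="_"
--
-- def proc_line_mask_short_word (line,lv,slv):
--     """
--     lv30 短い単語を消す
--         lv30 短い単語を1単語以上消す
--         lv31 短い単語を2単語以上消す
--         lv39 短い単語を10単語以上消す
--     """
--
--     di_len=make_len_dict(line)
--     wlenkeys=di_len.keys()
--     wlenkeys=sorted(wlenkeys,reverse=False)
--     wwordcounter=0
--     w_del_count=lv-slv+1
--     w_del_len=0
--     for wchklen in wlenkeys: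
--         wwordcounter=wwordcounter+di_len[wchklen]
--         if wwordcounter>w_del_count:
--             w_del_len=wchklen
--             break
--     #if w_del_len==0:
--     #    return ""
--     w_words=line.split(" ")
--     w_ret=list()
--     for w_word in w_words:
--         if len(w_word)<=w_del_len:
--             w_ret.append(MASK_CHAR*len(w_word))
--         else:
--             w_ret.append(w_word)
--     return " ".join(w_ret)
--
-- def make_len_dict(line):
--     w_words=line.split(" ")
--     di_len=dict()
--     for wele in w_words:
--         wlen=len(wele)
--         if wlen not in di_len:
--             di_len[wlen]=0
--         di_len[wlen]=di_len[wlen]+1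
--     return di_len
-- ===== SOURCE B (Python) =====
-- MASK_CHAR = "_"
--
-- def proc_line_mask_short_word(line, lv, slv):
--     words = line.split(" ")
--     lengths = sorted(len(w) for w in words)
--     w_del_count = lv - slv + 1
--     if w_del_count >= len(lengths):
--         w_del_len = 0
--     else:
--         w_del_len = lengths[max(w_del_count, 0)]
--     return " ".join(MASK_CHAR * len(w) if len(w) <= w_del_len else w
--                     for w in words)
-- ===== Notes on version B (the rewrite author's own statement) =====
-- stated objective: simpler
-- what changed: B drops A's length-frequency dict and cumulative accumulate-until-exceed scan over sorted distinct lengths, instead sorting the word lengths and selecting the masking threshold directly by rank (index w_del_count, clamped to 0, with threshold 0 when the rank is out of range); the masking pass is a single join over a comprehension.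
import Mathlib
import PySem

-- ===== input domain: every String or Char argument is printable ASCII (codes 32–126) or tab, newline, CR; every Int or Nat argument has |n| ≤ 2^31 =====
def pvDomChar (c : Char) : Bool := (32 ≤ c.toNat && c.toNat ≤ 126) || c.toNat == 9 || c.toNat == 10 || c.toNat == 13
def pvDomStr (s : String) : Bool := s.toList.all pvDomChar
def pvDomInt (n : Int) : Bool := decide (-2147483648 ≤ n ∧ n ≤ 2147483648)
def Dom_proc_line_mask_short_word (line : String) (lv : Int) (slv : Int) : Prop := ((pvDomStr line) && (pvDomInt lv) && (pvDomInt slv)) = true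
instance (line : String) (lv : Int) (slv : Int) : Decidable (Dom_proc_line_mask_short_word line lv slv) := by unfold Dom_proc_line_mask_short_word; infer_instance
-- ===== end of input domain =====

-- B replaces A's length-frequency dict and cumulative scan by sorting the word
-- lengths and selecting the threshold by rank (simpler; same masking loop).

-- ===== PORT A =====
-- helper make_len_dict: builds {word length: frequency} over line.split(" ")
-- (split(" ") has a non-empty separator, so split? is always `some`; getD [] is exact)
def make_len_dict (line : String) : PySem.Dict Int Int :=
  ((PySem.Str.split? line " ").getD []).foldl
    (fun di wele =>
      let wlen := PySem.Str.len wele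
      let di := if di.contains wlen then di else di.insert wlen 0
      di.insert wlen (di.getD wlen 0 + 1))
    PySem.Dict.empty

-- the for-loop over sorted keys with `break`: returns the breaking key, else the initial 0
def pvALoop (di : PySem.Dict Int Int) (w_del_count : Int) : List Int → Int → Int
  | [], _ => 0
  | wchklen :: rest, wwordcounter =>
    let wwordcounter := wwordcounter + di.getD wchklen 0
    if wwordcounter > w_del_count then wchklen else pvALoop di w_del_count rest wwordcounter

def proc_line_mask_short_word (line : String) (lv : Int) (slv : Int) : String :=
  let di_len := make_len_dict line
  let wlenkeys := PySem.List.sorted di_len.keys (fun x => x) false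
  let w_del_count := lv - slv + 1
  let w_del_len := pvALoop di_len w_del_count wlenkeys 0
  let w_words := (PySem.Str.split? line " ").getD []
  let w_ret := w_words.foldl
    (fun acc w_word =>
      if PySem.Str.len w_word ≤ w_del_len then
        -- MASK_CHAR*len(w_word): "_" repeated len(w_word) times (exact: len ≥ 0)
        acc ++ [String.ofList (PySem.List.pyRepeat ['_'] (PySem.Str.len w_word))]
      else
        acc ++ [w_word]) []
  PySem.Str.join " " w_ret

-- ===== PORT B =====
def proc_line_mask_short_word_alt (line : String) (lv : Int) (slv : Int) : String :=
  let words := (PySem.Str.split? line " ").getD []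
  let lengths := PySem.List.sorted (words.map PySem.Str.len) (fun x => x) false
  let w_del_count := lv - slv + 1
  let w_del_len :=
    if PySem.List.len lengths ≤ w_del_count then (0 : Int)
    -- lengths[max(w_del_count, 0)]: the index is guarded in range, so pyGetD is exact
    else PySem.List.pyGetD lengths (max w_del_count 0) 0
  PySem.Str.join " "
    (words.map (fun w =>
      if PySem.Str.len w ≤ w_del_len then
        String.ofList (PySem.List.pyRepeat ['_'] (PySem.Str.len w))
      else w))

-- ===== PRECONDITION & SPEC =====
def Spec_proc_line_mask_short_word (line : String) (lv : Int) (slv : Int) (out : String) : Prop := out = proc_line_mask_short_word_alt line lv slv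
instance (line : String) (lv : Int) (slv : Int) (out : String) : Decidable (Spec_proc_line_mask_short_word line lv slv out) := by unfold Spec_proc_line_mask_short_word; infer_instance

-- ===== CLAIM (what is proved, stated in full; the proofs are below) =====
def Claim_equal_proc_line_mask_short_word : Prop := ∀ (line : String) (lv : Int) (slv : Int), Dom_proc_line_mask_short_word line lv slv → Spec_proc_line_mask_short_word line lv slv (proc_line_mask_short_word line lv slv)

-- ===== LEMMAS AND PROOFS =====

-- one step of make_len_dict's loop: effect on a lookup
theorem pv_step_getD (d : PySem.Dict Int Int) (k v : Int) :
    ((if d.contains k then d else d.insert k 0).insert k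
      ((if d.contains k then d else d.insert k 0).getD k 0 + 1)).getD v 0
    = d.getD v 0 + (if v = k then 1 else 0) := by
  by_cases h : d.contains k = true
  · rw [if_pos h, PySem.Dict.getD_insert]
    split_ifs with hv
    · subst hv; ring
    · ring
  · have hk0 : d.getD k 0 = 0 := PySem.Dict.getD_of_not_contains d 0 (by simpa using h)
    rw [if_neg h, PySem.Dict.getD_insert]
    split_ifs with hv
    · subst hv
      rw [PySem.Dict.getD_insert]
      simp [hk0]
    · rw [PySem.Dict.getD_insert, if_neg hv]
      ring

theorem pv_getD_make (ws : List String) (d : PySem.Dict Int Int) (v : Int) :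
    (ws.foldl (fun di wele =>
      let wlen := PySem.Str.len wele
      let di := if di.contains wlen then di else di.insert wlen 0
      di.insert wlen (di.getD wlen 0 + 1)) d).getD v 0
    = d.getD v 0 + ((ws.map PySem.Str.len).count v : Int) := by
  induction ws generalizing d with
  | nil => simp
  | cons w ws ih =>
    simp only [List.foldl_cons, List.map_cons]
    rw [ih, pv_step_getD, List.count_cons]
    push_cast
    by_cases hv : v = PySem.Str.len w
    · rw [if_pos hv, if_pos (by rw [beq_iff_eq, PySem.Str.len_eq]; rw [PySem.Str.len_eq] at hv; omega)]
      ring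
    · rw [if_neg hv, if_neg (by simp only [beq_iff_eq, PySem.Str.len_eq] at hv ⊢; omega)]
      ring

-- one step of make_len_dict's loop: effect on the key list
theorem pv_step_keys_pos (d : PySem.Dict Int Int) (k : Int) (h : d.contains k = true) :
    ((if d.contains k then d else d.insert k 0).insert k
      ((if d.contains k then d else d.insert k 0).getD k 0 + 1)).keys = d.keys := by
  rw [if_pos h]
  exact PySem.Dict.keys_insert_of_contains d _ h

theorem pv_step_keys_neg (d : PySem.Dict Int Int) (k : Int) (h : d.contains k = false) :
    ((if d.contains k then d else d.insert k 0).insert k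
      ((if d.contains k then d else d.insert k 0).getD k 0 + 1)).keys = d.keys ++ [k] := by
  rw [if_neg (by simp [h]),
      PySem.Dict.keys_insert_of_contains _ _ (PySem.Dict.contains_insert_self d k 0),
      PySem.Dict.keys_insert_of_not_contains d _ h]

theorem pv_keys_make (ws : List String) (d : PySem.Dict Int Int) (hnd : d.keys.Nodup) :
    (ws.foldl (fun di wele =>
      let wlen := PySem.Str.len wele
      let di := if di.contains wlen then di else di.insert wlen 0
      di.insert wlen (di.getD wlen 0 + 1)) d).keys.Nodup
    ∧ ∀ v, v ∈ (ws.foldl (fun di wele =>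
      let wlen := PySem.Str.len wele
      let di := if di.contains wlen then di else di.insert wlen 0
      di.insert wlen (di.getD wlen 0 + 1)) d).keys ↔ v ∈ d.keys ∨ v ∈ ws.map PySem.Str.len := by
  induction ws generalizing d with
  | nil => simpa using hnd
  | cons w ws ih =>
    simp only [List.foldl_cons]
    by_cases h : d.contains (PySem.Str.len w) = true
    · have hk := pv_step_keys_pos d (PySem.Str.len w) h
      obtain ⟨h1, h2⟩ := ih _ (by rw [hk]; exact hnd)
      refine ⟨h1, fun v => ?_⟩
      rw [h2, hk]
      have hmem : PySem.Str.len w ∈ d.keys := (PySem.Dict.contains_iff_mem_keys d _).mp h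
      simp only [List.map_cons, List.mem_cons]
      constructor
      · rintro (hv | hv) <;> tauto
      · rintro (hv | hv | hv) <;> try tauto
        subst hv; tauto
    · have h' : d.contains (PySem.Str.len w) = false := by simpa using h
      have hk := pv_step_keys_neg d (PySem.Str.len w) h'
      have hnotmem : PySem.Str.len w ∉ d.keys := fun hm =>
        h ((PySem.Dict.contains_iff_mem_keys d _).mpr hm)
      obtain ⟨h1, h2⟩ := ih _ (by
        rw [hk]
        refine List.Nodup.append hnd (List.nodup_singleton _) ?_
        intro a ha hb
        rw [List.mem_singleton] at hb
        subst hb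
        exact hnotmem ha)
      refine ⟨h1, fun v => ?_⟩
      rw [h2, hk]
      simp only [List.mem_append, List.map_cons, List.mem_cons]
      tauto

-- the accumulator only shifts the budget
theorem pvALoop_shift (di : PySem.Dict Int Int) (ks : List Int) :
    ∀ (wdc acc : Int), pvALoop di wdc ks acc = pvALoop di (wdc - acc) ks 0 := by
  induction ks with
  | nil => intro wdc acc; rfl
  | cons k rest ih =>
    intro wdc acc
    simp only [pvALoop]
    by_cases h : acc + di.getD k 0 > wdc
    · rw [if_pos h, if_pos (by omega)]
    · rw [if_neg h, if_neg (by omega), ih wdc (acc + di.getD k 0), ih (wdc - acc) (0 + di.getD k 0)]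
      have harg : wdc - (acc + di.getD k 0) = wdc - acc - (0 + di.getD k 0) := by ring
      rw [harg]

-- A's cumulative scan over a key list ks, counts read from di, equals rank
-- selection in the flattened multiset ks.flatMap (replicate (cnt v) v)
theorem pv_loop_flat (di : PySem.Dict Int Int) (cnt : Int → Nat) :
    ∀ (ks : List Int) (k : Int),
    (∀ v ∈ ks, di.getD v 0 = (cnt v : Int) ∧ 0 < cnt v) →
    pvALoop di k ks 0 =
      (if ((ks.flatMap (fun v => List.replicate (cnt v) v)).length : Int) ≤ k then 0
       else PySem.List.pyGetD (ks.flatMap (fun v => List.replicate (cnt v) v)) (max k 0) 0) := by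
  intro ks
  induction ks with
  | nil => intro k _; simp [pvALoop, PySem.List.pyGetD, PySem.List.pyIdx?, PySem.List.pyGet?]
  | cons v rest ih =>
    intro k h
    obtain ⟨hd, hc⟩ := h v (by simp)
    simp only [pvALoop, List.flatMap_cons, zero_add, hd]
    by_cases hk : (cnt v : Int) > k
    · rw [if_pos hk]
      have hlen : ¬ (((List.replicate (cnt v) v ++ rest.flatMap fun u => List.replicate (cnt u) u).length : Int) ≤ k) := by
        simp only [List.length_append, List.length_replicate]
        push_cast; omega
      rw [if_neg hlen]
      have h1 : max k 0 < ((List.replicate (cnt v) v ++ rest.flatMap fun u => List.replicate (cnt u) u).length : Int) := by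
        simp only [List.length_append, List.length_replicate]; push_cast; omega
      rw [PySem.List.pyGetD_eq_getElem _ _ (le_max_right _ _) h1]
      have h2 : (max k 0).toNat < (List.replicate (cnt v) v).length := by
        simp only [List.length_replicate]; omega
      rw [List.getElem_append_left h2]
      simp
    · rw [if_neg hk, pvALoop_shift]
      rw [ih (k - cnt v) (fun u hu => h u (by simp [hu]))]
      have hc' : (0:Int) < (cnt v : Int) := by exact_mod_cast hc
      have hmax : max k 0 = k := by omega
      have hmax2 : max (k - cnt v) 0 = k - cnt v := by omega
      by_cases hbig : (((rest.flatMap fun u => List.replicate (cnt u) u).length : Int) ≤ k - cnt v)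
      · rw [if_pos hbig, if_pos (by simp only [List.length_append, List.length_replicate]; push_cast at hbig ⊢; omega)]
      · rw [if_neg hbig, if_neg (by simp only [List.length_append, List.length_replicate]; push_cast at hbig ⊢; omega)]
        push_cast at hbig
        rw [hmax, hmax2,
            PySem.List.pyGetD_eq_getElem _ _ (by omega) (by omega),
            PySem.List.pyGetD_eq_getElem _ _ (by omega) (by simp only [List.length_append, List.length_replicate]; push_cast; omega)]
        rw [List.getElem_append_right (by simp only [List.length_replicate]; omega)]
        congr 1
        simp only [List.length_replicate]
        omega

-- the flattened multiset IS sorted(L) when ks lists exactly L's values strictly increasingly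
theorem pv_flat_count (L : List Int) (ks : List Int) (hnd : ks.Nodup) (x : Int) :
    (ks.flatMap (fun v => List.replicate (L.count v) v)).count x
      = if x ∈ ks then L.count x else 0 := by
  induction ks with
  | nil => simp
  | cons v rest ih =>
    rw [List.nodup_cons] at hnd
    simp only [List.flatMap_cons, List.count_append, List.count_replicate, List.mem_cons,
      ih hnd.2]
    by_cases hv : x = v
    · subst hv; simp [hnd.1]
    · simp [hv, Ne.symm hv]

theorem pv_flat_pairwise (f : Int → Nat) (ks : List Int) (hsort : ks.Pairwise (· < ·)) :
    (ks.flatMap (fun v => List.replicate (f v) v)).Pairwise (· ≤ ·) := by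
  induction ks with
  | nil => simp
  | cons v rest ih =>
    rw [List.pairwise_cons] at hsort
    simp only [List.flatMap_cons]
    rw [List.pairwise_append]
    refine ⟨List.pairwise_replicate.mpr (Or.inr le_rfl), ih hsort.2, ?_⟩
    intro a ha b hb
    rw [List.eq_of_mem_replicate ha]
    rw [List.mem_flatMap] at hb
    obtain ⟨u, hu, hb⟩ := hb
    rw [List.eq_of_mem_replicate hb]
    exact le_of_lt (hsort.1 u hu)

theorem pv_flat_eq_sorted (L : List Int) (ks : List Int)
    (hnd : ks.Nodup) (hmem : ∀ v, v ∈ ks ↔ v ∈ L) (hsort : ks.Pairwise (· < ·)) :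
    ks.flatMap (fun v => List.replicate (L.count v) v)
      = PySem.List.sorted L (fun x => x) false := by
  symm
  apply PySem.List.sorted_id_eq_of_perm_of_pairwise
  · rw [List.perm_iff_count]
    intro x
    rw [pv_flat_count L ks hnd x]
    by_cases hx : x ∈ ks
    · simp [hx]
    · rw [if_neg hx]
      rw [hmem] at hx
      exact (List.count_eq_zero.mpr hx).symm
  · exact pv_flat_pairwise (fun v => L.count v) ks hsort

-- A's threshold equals B's rank-selected threshold, for any dict that counts L
theorem pv_threshold (L : List Int) (d : PySem.Dict Int Int) (wdc : Int)
    (hnd : d.keys.Nodup) (hmem : ∀ v, v ∈ d.keys ↔ v ∈ L)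
    (hget : ∀ v, d.getD v 0 = (L.count v : Int)) :
    pvALoop d wdc (PySem.List.sorted d.keys (fun x => x) false) 0
      = if PySem.List.len (PySem.List.sorted L (fun x => x) false) ≤ wdc then 0
        else PySem.List.pyGetD (PySem.List.sorted L (fun x => x) false) (max wdc 0) 0 := by
  set ks : List Int := PySem.List.sorted d.keys (fun x => x) false with hks
  have hksnd : ks.Nodup := ((PySem.List.sorted_perm d.keys (fun x => x) false).nodup_iff).mpr hnd
  have hksmem : ∀ v, v ∈ ks ↔ v ∈ L := by
    intro v
    rw [hks, PySem.List.mem_sorted]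
    exact hmem v
  have hkssort : ks.Pairwise (· < ·) := by
    have h1 := PySem.List.sorted_pairwise d.keys (fun x => x)
    have h2 : ks.Pairwise (· ≠ ·) := hksnd
    exact ((h1.and h2).imp (fun h => lt_of_le_of_ne h.1 h.2))
  have hgetD : ∀ v ∈ ks, d.getD v 0 = ((L.count v : Nat) : Int) ∧ 0 < L.count v := by
    intro v hv
    exact ⟨hget v, List.count_pos_iff.mpr ((hksmem v).mp hv)⟩
  rw [pv_loop_flat d (fun v => L.count v) ks wdc hgetD,
      pv_flat_eq_sorted L ks hksnd hksmem hkssort, PySem.List.len_eq,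
      ((PySem.List.sorted_perm L (fun x => x) false).length_eq)]

-- A's append loop over words is B's map
theorem pv_mask_fold (t : Int) (ws : List String) :
    ws.foldl (fun acc w => if PySem.Str.len w ≤ t then
        acc ++ [String.ofList (PySem.List.pyRepeat ['_'] (PySem.Str.len w))] else acc ++ [w]) []
    = ws.map (fun w => if PySem.Str.len w ≤ t then
        String.ofList (PySem.List.pyRepeat ['_'] (PySem.Str.len w)) else w) := by
  have hfun : (fun (acc : List String) w => if PySem.Str.len w ≤ t then
        acc ++ [String.ofList (PySem.List.pyRepeat ['_'] (PySem.Str.len w))] else acc ++ [w])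
      = (fun acc w => acc ++ [if PySem.Str.len w ≤ t then
        String.ofList (PySem.List.pyRepeat ['_'] (PySem.Str.len w)) else w]) := by
    funext acc w
    exact (apply_ite (fun z => acc ++ [z]) _ _ _).symm
  rw [hfun, PySem.List.foldl_append_singleton_eq_map]
  simp

-- ===== VERDICT (by name: the statement is the Claim_ definition above) =====
theorem proc_line_mask_short_word_spec : Claim_equal_proc_line_mask_short_word := by
  intro line lv slv _
  unfold Spec_proc_line_mask_short_word proc_line_mask_short_word proc_line_mask_short_word_alt
  dsimp only
  have hnd : (make_len_dict line).keys.Nodup := by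
    simpa [make_len_dict] using
      (pv_keys_make ((PySem.Str.split? line " ").getD []) PySem.Dict.empty (by simp)).1
  have hmem : ∀ v, v ∈ (make_len_dict line).keys ↔
      v ∈ ((PySem.Str.split? line " ").getD []).map PySem.Str.len := by
    intro v
    have h := (pv_keys_make ((PySem.Str.split? line " ").getD []) PySem.Dict.empty (by simp)).2 v
    rw [PySem.Dict.keys_empty] at h
    simpa [make_len_dict] using h
  have hget : ∀ v, (make_len_dict line).getD v 0
      = ((((PySem.Str.split? line " ").getD []).map PySem.Str.len).count v : Int) := by
    intro v
    have h := pv_getD_make ((PySem.Str.split? line " ").getD []) PySem.Dict.empty v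
    rw [PySem.Dict.getD_empty] at h
    simpa [make_len_dict] using h
  rw [pv_threshold (((PySem.Str.split? line " ").getD []).map PySem.Str.len)
        (make_len_dict line) (lv - slv + 1) hnd hmem hget]
  rw [pv_mask_fold]
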